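-- pv_equiv track=rewrite | github.com/erjan/coding_exercises | longest_subsequence_with_limited_sum.py | answerQueries
-- ===== SOURCE A (Python) =====
-- from typing import List
--
-- def answerQueries(nums: List[int], queries: List[int]) -> List[int]:
--
--     nums.sort()
--
--     pref = list()
--     pref.append(nums[0])
--
--     for i in range(1, len(nums)):
--         pref.append(pref[i-1] + nums[i])
--     ans = [0] * len(queries)
--     for i in range(len(queries)):
--         cur_sum = 0
--         query = queries[i]
--         ind = -1
--         for j in range(len(nums)):
--             if cur_sum + nums[j] > query:
--                 break
--             cur_sum = cur_sum + nums[j]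
--             ind = j
--         ans[i] = ind+1
--     return ans
-- ===== SOURCE B (Python) =====
-- from bisect import bisect_right
-- from itertools import accumulate
-- from typing import List
--
-- def answerQueries(nums: List[int], queries: List[int]) -> List[int]:
--     # running maxima of the prefix sums of the sorted list are nondecreasing,
--     # so each query is answered by one binary search
--     mx = list(accumulate(accumulate(sorted(nums)), max))
--     return [bisect_right(mx, q) for q in queries]
-- ===== Notes on version B (the rewrite author's own statement) =====
-- stated objective: faster
-- what changed: B replaces A's per-query linear scan over the sorted array with one pass building the running maxima of the prefix sums and a bisect_right binary search per query; A sorts nums in place and B does not (return values agree).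
import Mathlib
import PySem

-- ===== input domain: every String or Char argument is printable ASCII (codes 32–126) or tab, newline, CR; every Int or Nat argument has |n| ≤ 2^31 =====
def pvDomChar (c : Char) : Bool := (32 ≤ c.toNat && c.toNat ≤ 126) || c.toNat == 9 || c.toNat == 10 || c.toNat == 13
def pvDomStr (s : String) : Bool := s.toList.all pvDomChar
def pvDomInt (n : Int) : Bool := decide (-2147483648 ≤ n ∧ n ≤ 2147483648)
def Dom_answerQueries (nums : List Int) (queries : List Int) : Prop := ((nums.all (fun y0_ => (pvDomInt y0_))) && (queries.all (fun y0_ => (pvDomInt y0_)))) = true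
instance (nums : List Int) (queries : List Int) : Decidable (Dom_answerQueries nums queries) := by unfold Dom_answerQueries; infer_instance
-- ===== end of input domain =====

-- B answers each query by a binary search over the running maxima of the prefix sums of the
-- sorted list instead of A's per-query linear scan (asymptotically faster); equivalence is about
-- the RETURN value only: A sorts `nums` in place, B does not mutate it.

set_option maxRecDepth 8192


-- ===== PORT A =====
-- A's `pref` list (built but never read afterwards by A); on sorted = [] A raises (nums[0]),
-- excluded by Pre_; the fold is A's `for i in range(1, len(nums)): pref.append(pref[i-1]+nums[i])`.
def aPref (s : List Int) : List Int :=
  match s with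
  | [] => []
  | x :: xs => xs.foldl (fun p y => p ++ [p.getLast! + y]) [x]

-- A's inner `for j in range(len(nums))` loop with `break`: carries cur_sum and ind
-- (when element j is taken A sets ind = j, i.e. ind increments by 1).
def aInner (l : List Int) (query : Int) (cur_sum : Int) (ind : Int) : Int :=
  match l with
  | [] => ind
  | x :: xs => if cur_sum + x > query then ind else aInner xs query (cur_sum + x) (ind + 1)

def answerQueries (nums : List Int) (queries : List Int) : List Int :=
  let s := PySem.List.sorted nums (fun x => x) false
  let _pref := aPref s
  queries.map (fun q => aInner s q 0 (-1) + 1)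

-- ===== PORT B =====
-- itertools.accumulate(l, f) (no initial value)
def pyAccumGo (f : Int → Int → Int) (a : Int) : List Int → List Int
  | [] => [a]
  | y :: ys => a :: pyAccumGo f (f a y) ys

def pyAccumulate (f : Int → Int → Int) : List Int → List Int
  | [] => []
  | x :: xs => pyAccumGo f x xs

def answerQueries_alt (nums : List Int) (queries : List Int) : List Int :=
  let mx := pyAccumulate max (pyAccumulate (· + ·) (PySem.List.sorted nums (fun x => x) false))
  queries.map (fun q => (PySem.List.bisectRight mx q : Int))

-- ===== PRECONDITION & SPEC =====
-- A evaluates nums[0], so it raises IndexError exactly on empty nums.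
def Pre_answerQueries (nums : List Int) (queries : List Int) : Prop := nums ≠ []
instance (nums : List Int) (queries : List Int) : Decidable (Pre_answerQueries nums queries) := by unfold Pre_answerQueries; infer_instance
def pvWitness_answerQueries : List Int × List Int := ([3, 1, 2], [4, 0])

def Spec_answerQueries (nums : List Int) (queries : List Int) (out : List Int) : Prop := out = answerQueries_alt nums queries
instance (nums : List Int) (queries : List Int) (out : List Int) : Decidable (Spec_answerQueries nums queries out) := by unfold Spec_answerQueries; infer_instance

-- ===== CLAIM (what is proved, stated in full; the proofs are below) =====
def Claim_equal_answerQueries : Prop := ∀ (nums : List Int) (queries : List Int), Dom_answerQueries nums queries → Pre_answerQueries nums queries → Spec_answerQueries nums queries (answerQueries nums queries)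

-- ===== LEMMAS AND PROOFS =====

-- the count of elements A's inner loop takes
def W (l : List Int) (q : Int) (c : Int) : Int :=
  match l with
  | [] => 0
  | x :: xs => if c + x > q then 0 else 1 + W xs q (c + x)

theorem aInner_eq (l : List Int) (q c i : Int) : aInner l q c i = i + W l q c := by
  induction l generalizing c i with
  | nil => simp [aInner, W]
  | cons x xs ih =>
    simp only [aInner, W]
    split_ifs with h
    · simp
    · rw [ih]; ring

-- fused running-max-of-prefix-sums list: in fgo c m ys, m is the running max so far and
-- c the next prefix sum
def fgo (c m : Int) : List Int → List Int
  | [] => [m, max m c]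
  | y :: ys => m :: fgo (c + y) (max m c) ys

theorem fusion (ys : List Int) (m c : Int) :
    pyAccumGo max m (pyAccumGo (· + ·) c ys) = fgo c m ys := by
  induction ys generalizing m c with
  | nil => simp [pyAccumGo, fgo]
  | cons y ys ih => simp [pyAccumGo, fgo, ih]

theorem fgo_length (ys : List Int) (c m : Int) : (fgo c m ys).length = ys.length + 2 := by
  induction ys generalizing c m with
  | nil => simp [fgo]
  | cons y ys ih => simp [fgo, ih]

theorem fgo_mem_le (ys : List Int) (c m : Int) : ∀ z ∈ fgo c m ys, m ≤ z := by
  induction ys generalizing c m with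
  | nil =>
    intro z hz
    simp only [fgo, List.mem_cons, List.not_mem_nil, or_false] at hz
    rcases hz with h | h <;> simp [h]
  | cons y ys ih =>
    intro z hz
    simp only [fgo, List.mem_cons] at hz
    rcases hz with h | h
    · simp [h]
    · exact le_trans (le_max_left m c) (ih _ _ z h)

theorem fgo_pairwise (ys : List Int) (c m : Int) : (fgo c m ys).Pairwise (· ≤ ·) := by
  induction ys generalizing c m with
  | nil => simp [fgo]
  | cons y ys ih =>
    simp only [fgo]
    exact List.pairwise_cons.mpr
      ⟨fun z hz => le_trans (le_max_left m c) (fgo_mem_le ys _ _ z hz), ih _ _⟩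

-- Nat-valued count of further prefix sums ≤ q, starting at prefix sum c
def U (q c : Int) : List Int → Nat
  | [] => if c ≤ q then 1 else 0
  | y :: ys => if c ≤ q then 1 + U q (c + y) ys else 0

theorem U_le (q c : Int) (ys : List Int) : U q c ys ≤ ys.length + 1 := by
  induction ys generalizing c with
  | nil => simp [U]; split_ifs <;> omega
  | cons y ys ih =>
    simp only [U, List.length_cons]
    split_ifs with h
    · have := ih (c + y); omega
    · omega

theorem W_eq_U (xs : List Int) (q : Int) : ∀ c x, W (x :: xs) q c = (U q (c + x) xs : Int) := by
  induction xs with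
  | nil =>
    intro c x
    simp only [W, U]
    by_cases h : c + x ≤ q
    · rw [if_neg (by omega), if_pos h]; simp
    · rw [if_pos (by omega), if_neg h]; simp
  | cons y ys ih =>
    intro c x
    simp only [W, U]
    by_cases h : c + x ≤ q
    · rw [if_neg (by omega), if_pos h]
      have hWy := ih (c + x) y
      simp only [W] at hWy
      rw [hWy]
      push_cast; ring
    · rw [if_pos (by omega), if_neg h]; simp

-- getElem characterization of the ≤-prefix of fgo
theorem fgo_char (ys : List Int) (q c m : Int) (hm : m ≤ q) :
    ∀ j (hj : j < (fgo c m ys).length), (j < 1 + U q c ys ↔ (fgo c m ys)[j] ≤ q) := by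
  induction ys generalizing c m with
  | nil =>
    intro j hj
    simp only [fgo_length, List.length_nil] at hj
    interval_cases j
    · simp only [fgo, List.getElem_cons_zero]
      exact ⟨fun _ => hm, fun _ => by omega⟩
    · simp only [fgo, U, List.getElem_cons_succ, List.getElem_cons_zero]
      by_cases hc : c ≤ q
      · rw [if_pos hc]
        exact ⟨fun _ => max_le hm hc, fun _ => by omega⟩
      · rw [if_neg hc]
        exact ⟨fun h => absurd h (by omega), fun h => absurd (le_trans (le_max_right m c) h) hc⟩
  | cons y ys ih =>
    intro j hj
    simp only [fgo] at hj ⊢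
    by_cases hc : c ≤ q
    · cases j with
      | zero =>
        simp only [List.getElem_cons_zero]
        exact ⟨fun _ => hm, fun _ => by omega⟩
      | succ j =>
        have hj' : j < (fgo (c + y) (max m c) ys).length := by
          simp only [List.length_cons] at hj; omega
        have hIH := ih (c + y) (max m c) (max_le hm hc) j hj'
        simp only [List.getElem_cons_succ, U, if_pos hc]
        rw [show 1 + (1 + U q (c + y) ys) = (1 + U q (c + y) ys) + 1 by omega,
          Nat.succ_lt_succ_iff]
        exact hIH
    · cases j with
      | zero =>
        simp only [List.getElem_cons_zero]
        exact ⟨fun _ => hm, fun _ => by omega⟩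
      | succ j =>
        have hj' : j < (fgo (c + y) (max m c) ys).length := by
          simp only [List.length_cons] at hj; omega
        simp only [List.getElem_cons_succ, U, if_neg hc]
        constructor
        · intro h; exact absurd h (by omega)
        · intro hle
          exfalso
          have hge : max m c ≤ (fgo (c + y) (max m c) ys)[j] :=
            fgo_mem_le _ _ _ _ (List.getElem_mem hj')
          have : c ≤ q := le_trans (le_trans (le_max_right m c) hge) hle
          exact hc this

-- bisectRight is determined by any valid ≤-prefix length
theorem bisect_unique (l : List Int) (q : Int) (hs : l.Pairwise (· ≤ ·)) (v : Nat)
    (hv : v ≤ l.length) (hchar : ∀ j (hj : j < l.length), (j < v ↔ l[j] ≤ q)) :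
    PySem.List.bisectRight l q = v := by
  obtain ⟨hk, hlo, hhi⟩ := PySem.List.bisectRight_spec l q hs
  set k := PySem.List.bisectRight l q with hkdef
  rcases lt_trichotomy k v with h | h | h
  · have hklen : k < l.length := lt_of_lt_of_le h hv
    exact absurd ((hchar k hklen).mp h) (not_le.mpr (hhi k hklen le_rfl))
  · exact h
  · have hvlen : v < l.length := lt_of_lt_of_le h hk
    have h2 := (hchar v hvlen).mpr (hlo v hvlen h)
    exact absurd h2 (lt_irrefl v)

-- per-query agreement on a nonempty sorted list
theorem query_eq (s : List Int) (hs : s ≠ []) (q : Int) :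
    aInner s q 0 (-1) + 1
      = (PySem.List.bisectRight (pyAccumulate max (pyAccumulate (· + ·) s)) q : Int) := by
  obtain ⟨x, xs, rfl⟩ := List.exists_cons_of_ne_nil hs
  have hW : aInner (x :: xs) q 0 (-1) + 1 = W (x :: xs) q 0 := by
    rw [aInner_eq]; ring
  rw [hW]
  cases xs with
  | nil =>
    simp only [pyAccumulate, pyAccumGo]
    by_cases hx : x ≤ q
    · rw [bisect_unique [x] q (by simp) 1 (by simp)
        (by intro j hj
            simp only [List.length_cons, List.length_nil] at hj
            have hj0 : j = 0 := by omega
            subst hj0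
            simp [hx])]
      simp only [W]
      rw [if_neg (by omega)]
      simp
    · rw [bisect_unique [x] q (by simp) 0 (by simp)
        (by intro j hj
            simp only [List.length_cons, List.length_nil] at hj
            have hj0 : j = 0 := by omega
            subst hj0
            simp [hx])]
      simp only [W]
      rw [if_pos (by omega)]
      simp
  | cons y ys =>
    have hfuse : pyAccumulate max (pyAccumulate (· + ·) (x :: y :: ys))
        = fgo (x + y) x ys := by
      simp only [pyAccumulate, pyAccumGo]
      exact fusion ys x (x + y)
    rw [hfuse]
    by_cases hx : x ≤ q
    · have hv : 1 + U q (x + y) ys ≤ (fgo (x + y) x ys).length := by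
        have := U_le q (x + y) ys
        rw [fgo_length]; omega
      rw [bisect_unique _ q (fgo_pairwise ys _ _) (1 + U q (x + y) ys) hv
        (fun j hj => fgo_char ys q (x + y) x hx j hj)]
      have h1 : W (x :: y :: ys) q 0 = 1 + W (y :: ys) q (0 + x) := by
        simp only [W]
        rw [if_neg (by omega)]
      rw [h1, zero_add, W_eq_U ys q x y]
      push_cast; ring
    · rw [bisect_unique _ q (fgo_pairwise ys _ _) 0 (Nat.zero_le _)
        (fun j hj => by
          constructor
          · intro h; exact absurd h (by omega)
          · intro hle
            exfalso
            have hge : x ≤ (fgo (x + y) x ys)[j] :=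
              fgo_mem_le _ _ _ _ (List.getElem_mem _)
            have hx' : q < x := lt_of_not_ge hx
            omega)]
      simp only [W]
      rw [if_pos (by omega)]
      simp

-- ===== VERDICT (by name: the statement is the Claim_ definition above) =====
theorem answerQueries_spec : Claim_equal_answerQueries := by
  intro nums queries _ hpre
  unfold Spec_answerQueries answerQueries answerQueries_alt
  have hs : PySem.List.sorted nums (fun x => x) false ≠ [] := by
    simpa [PySem.List.sorted_eq_nil_iff] using hpre
  exact List.map_congr_left (fun q _ => query_eq _ hs q)
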